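-- pv_equiv track=rewrite | github.com/arjunmenonv/HW-Spectrum-Analyzer | Display-Interfacing/UART_detect.py | findBoard
-- ===== SOURCE A (Python) =====
-- def findBoard(portsFound):
--
-- 	BoardPort = 'None'
-- 	numConnections = len(portsFound)
--
-- 	for i in range(numConnections):
--
-- 		port = portsFound[i]
-- 		strPort = str(port)
--
-- 		if 'Digilent' in strPort:
-- 			splitPort = strPort.split(' ')
-- 			BoardPort = (splitPort[0])
--
-- 	return BoardPort
-- ===== SOURCE B (Python) =====
-- def findBoard(portsFound):
--     # reverse scan with early exit: the last forward match is the first match from the end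
--     for port in reversed(portsFound):
--         strPort = str(port)
--         if 'Digilent' in strPort:
--             return strPort.split(' ')[0]
--     return 'None'
-- ===== Notes on version B (the rewrite author's own statement) =====
-- stated objective: alternative
-- what changed: Replaces the forward loop that keeps overwriting a last-match accumulator with a reverse scan that returns on the first match, maintaining no running variable.
import Mathlib
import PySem

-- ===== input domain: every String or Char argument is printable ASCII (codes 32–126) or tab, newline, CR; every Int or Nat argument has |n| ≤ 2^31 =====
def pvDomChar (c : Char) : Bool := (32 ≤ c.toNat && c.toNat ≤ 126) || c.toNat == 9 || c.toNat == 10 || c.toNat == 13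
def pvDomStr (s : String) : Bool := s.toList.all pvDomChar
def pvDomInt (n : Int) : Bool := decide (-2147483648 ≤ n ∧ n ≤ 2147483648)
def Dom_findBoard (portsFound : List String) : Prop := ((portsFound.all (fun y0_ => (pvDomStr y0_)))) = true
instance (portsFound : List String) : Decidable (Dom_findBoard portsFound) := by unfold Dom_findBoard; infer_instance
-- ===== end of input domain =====

-- B replaces A's forward overwrite-the-accumulator loop with a reverse scan returning the
-- first match from the end (objective: alternative decomposition; return value identical).

-- ===== PORT A =====
-- for-loop over the ports keeping the last match in BoardPort.
-- splitPort[0] is total here: split(' ') (nonempty separator) never returns an empty list,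
-- so .headD "" is exact.
def findBoard (portsFound : List String) : String :=
  portsFound.foldl
    (fun BoardPort port =>
      let strPort := port
      if PySem.Str.isIn "Digilent" strPort then
        let splitPort := (PySem.Str.split? strPort " ").getD []
        splitPort.headD ""
      else BoardPort)
    "None"

-- ===== PORT B =====
-- reverse scan with early exit; no accumulator. Same note: split(' ')[0] is total, .headD "" exact.
def findBoardRevGo : List String → String
  | [] => "None"
  | port :: rest =>
      let strPort := port
      if PySem.Str.isIn "Digilent" strPort then
        ((PySem.Str.split? strPort " ").getD []).headD ""
      else findBoardRevGo rest

def findBoard_alt (portsFound : List String) : String :=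
  findBoardRevGo portsFound.reverse

-- ===== PRECONDITION & SPEC =====
def Spec_findBoard (portsFound : List String) (out : String) : Prop := out = findBoard_alt portsFound
instance (portsFound : List String) (out : String) : Decidable (Spec_findBoard portsFound out) := by unfold Spec_findBoard; infer_instance

-- ===== CLAIM (what is proved, stated in full; the proofs are below) =====
def Claim_equal_findBoard : Prop := ∀ (portsFound : List String), Dom_findBoard portsFound → Spec_findBoard portsFound (findBoard portsFound)

-- ===== LEMMAS AND PROOFS =====

-- proof-side generalisation of findBoardRevGo with an explicit default
def goAcc : List String → String → String
  | [], acc => acc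
  | port :: rest, acc =>
      if PySem.Str.isIn "Digilent" port then
        ((PySem.Str.split? port " ").getD []).headD ""
      else goAcc rest acc

theorem goAcc_eq_revGo (l : List String) : goAcc l "None" = findBoardRevGo l := by
  induction l with
  | nil => rfl
  | cons p r ih => simp [goAcc, findBoardRevGo, ih]

theorem goAcc_append (l : List String) (x : String) (acc : String) :
    goAcc (l ++ [x]) acc
      = goAcc l (if PySem.Str.isIn "Digilent" x then
          ((PySem.Str.split? x " ").getD []).headD "" else acc) := by
  induction l with
  | nil => rfl
  | cons p r ih => simp [goAcc, ih]

theorem foldl_eq_goAcc (xs : List String) (acc : String) :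
    xs.foldl
      (fun BoardPort port =>
        let strPort := port
        if PySem.Str.isIn "Digilent" strPort then
          let splitPort := (PySem.Str.split? strPort " ").getD []
          splitPort.headD ""
        else BoardPort) acc
      = goAcc xs.reverse acc := by
  induction xs generalizing acc with
  | nil => rfl
  | cons p r ih =>
      simp only [List.foldl_cons, List.reverse_cons, ih, goAcc_append]

-- ===== VERDICT (by name: the statement is the Claim_ definition above) =====
theorem findBoard_spec : Claim_equal_findBoard := by
  intro portsFound _
  show findBoard portsFound = findBoard_alt portsFound
  simpa [findBoard, findBoard_alt, goAcc_eq_revGo] using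
    foldl_eq_goAcc portsFound "None"
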